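-- pv_equiv track=rewrite | github.com/sophieperrot/adventofcode | 2025/day2.py | new_is_invalid
-- ===== SOURCE A (Python) =====
-- def new_is_invalid(id: str, unit_len: int):
--     repeats = unit_len * (len(id) // unit_len - 1)
--     for i in range(0, repeats, unit_len):
--         try:
--             if id[i:i+unit_len] != id[i+unit_len:i+2*unit_len]:
--                 return False
--         except:
--             break
--     return True
-- ===== SOURCE B (Python) =====
-- def new_is_invalid(id: str, unit_len: int):
--     n = len(id) // unit_len
--     blocks = {id[i:i + unit_len] for i in range(0, n * unit_len, unit_len)}
--     return len(blocks) <= 1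
-- ===== Notes on version B (the rewrite author's own statement) =====
-- stated objective: idiomatic
-- what changed: A's loop comparing each fixed-length block slice with the next one (with early return False) is replaced by building the set of all full blocks and returning whether it has at most one distinct element.
import Mathlib
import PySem

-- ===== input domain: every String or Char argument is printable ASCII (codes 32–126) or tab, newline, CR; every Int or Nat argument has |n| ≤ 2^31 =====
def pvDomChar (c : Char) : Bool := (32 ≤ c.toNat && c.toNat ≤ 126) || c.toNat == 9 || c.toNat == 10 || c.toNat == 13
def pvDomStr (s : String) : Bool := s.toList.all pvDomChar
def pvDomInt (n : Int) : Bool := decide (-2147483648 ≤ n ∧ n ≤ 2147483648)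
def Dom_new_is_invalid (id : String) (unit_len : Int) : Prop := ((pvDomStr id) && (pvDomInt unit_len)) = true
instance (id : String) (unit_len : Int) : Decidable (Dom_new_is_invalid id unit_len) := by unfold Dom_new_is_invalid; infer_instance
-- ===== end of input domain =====

-- B replaces A's pairwise adjacent-block comparison loop by building the set of
-- full blocks and testing that it has at most one distinct element (idiomatic).

-- ===== PORT A =====
-- A's loop with early 'return False'; Python slicing never raises, so the
-- try/except in A is dead and the port is exact without it.
def newIsInvalidLoopA (s : List Char) (u : Int) : List Int → Bool
  | [] => true
  | i :: rest =>
    if PySem.List.slice s (some i) (some (i + u)) ≠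
       PySem.List.slice s (some (i + u)) (some (i + 2 * u)) then false
    else newIsInvalidLoopA s u rest

def new_is_invalid (id : String) (unit_len : Int) : Bool :=
  let repeats := unit_len * (PySem.Int.floordiv (id.toList.length : Int) unit_len - 1)
  newIsInvalidLoopA id.toList unit_len (PySem.List.pyRange 0 repeats unit_len)

-- ===== PORT B =====
def new_is_invalid_alt (id : String) (unit_len : Int) : Bool :=
  let n := PySem.Int.floordiv (id.toList.length : Int) unit_len
  let blocks : PySem.Set (List Char) :=
    PySem.Set.ofList ((PySem.List.pyRange 0 (n * unit_len) unit_len).map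
      (fun i => PySem.List.slice id.toList (some i) (some (i + unit_len))))
  decide (blocks.length ≤ 1)

-- ===== PRECONDITION & SPEC =====
-- unit_len = 0 makes Python's '//' raise ZeroDivisionError (in both A and B).
def Pre_new_is_invalid (id : String) (unit_len : Int) : Prop := unit_len ≠ 0
instance (id : String) (unit_len : Int) : Decidable (Pre_new_is_invalid id unit_len) := by
  unfold Pre_new_is_invalid; infer_instance

def pvWitness_new_is_invalid : String × Int := ("abab", 2)

def Spec_new_is_invalid (id : String) (unit_len : Int) (out : Bool) : Prop := out = new_is_invalid_alt id unit_len
instance (id : String) (unit_len : Int) (out : Bool) : Decidable (Spec_new_is_invalid id unit_len out) := by unfold Spec_new_is_invalid; infer_instance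

-- ===== CLAIM (what is proved, stated in full; the proofs are below) =====
def Claim_equal_new_is_invalid : Prop := ∀ (id : String) (unit_len : Int), Dom_new_is_invalid id unit_len → Pre_new_is_invalid id unit_len → Spec_new_is_invalid id unit_len (new_is_invalid id unit_len)

-- ===== LEMMAS AND PROOFS =====

-- A's loop is an 'all' over the index list.
theorem loopA_eq_all (s : List Char) (u : Int) (l : List Int) :
    newIsInvalidLoopA s u l =
      l.all (fun i => PySem.List.slice s (some i) (some (i + u)) ==
                      PySem.List.slice s (some (i + u)) (some (i + 2 * u))) := by
  induction l with
  | nil => rfl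
  | cons i rest ih =>
      simp only [newIsInvalidLoopA, List.all_cons, ih]
      by_cases h : PySem.List.slice s (some i) (some (i + u)) =
          PySem.List.slice s (some (i + u)) (some (i + 2 * u)) <;> simp [h]

-- a dedup'd list has at most one element iff all elements of the list coincide
theorem dedup_length_le_one_iff {α : Type} [BEq α] [LawfulBEq α] (l : List α) :
    (PySem.List.dedup l).length ≤ 1 ↔ ∀ x ∈ l, ∀ y ∈ l, x = y := by
  constructor
  · intro h x hx y hy
    rw [← PySem.List.mem_dedup] at hx hy
    match hd : PySem.List.dedup l with
    | [] => rw [hd] at hx; simp at hx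
    | [a] => rw [hd] at hx hy; simp at hx hy; rw [hx, hy]
    | a :: b :: t => rw [hd] at h; simp at h
  · intro h
    match hd : PySem.List.dedup l with
    | [] => simp
    | [a] => simp
    | a :: b :: t =>
      have hnd := PySem.List.nodup_dedup l
      rw [hd] at hnd
      have ha : a ∈ l := by rw [← PySem.List.mem_dedup, hd]; simp
      have hb : b ∈ l := by rw [← PySem.List.mem_dedup, hd]; simp
      have := h a ha b hb
      simp [this] at hnd
  
-- chain of adjacent equalities ↔ everything equals f 0
theorem chain_iff_all_eq {α : Type} (f : ℕ → α) (m : ℕ) :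
    (∀ k, k + 1 < m → f k = f (k + 1)) ↔ (∀ k, k < m → f k = f 0) := by
  constructor
  · intro h k hk
    induction k with
    | zero => rfl
    | succ j ih => rw [← h j hk]; exact ih (by omega)
  · intro h k hk
    rw [h k (by omega), h (k + 1) hk]

-- index arithmetic: ⌊(u*n - 1)/u⌋ for 0 < u
theorem ediv_mul_sub_one (u n : Int) (hu : 0 < u) : (u * n - 1) / u = n - 1 := by
  have h1 : u * n - 1 = (u - 1) + (n - 1) * u := by ring
  rw [h1, Int.add_mul_ediv_right _ _ (by omega : u ≠ 0),
      Int.ediv_eq_zero_of_lt (by omega) (by omega)]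
  omega

-- the two pyRanges for 0 < u, with n = ⌊len // u⌋ ≥ 0 written as a Nat m
theorem pyRange_A_of_pos (u : Int) (m : ℕ) (hu : 0 < u) :
    PySem.List.pyRange 0 (u * ((m : Int) - 1)) u =
      (List.range (m - 1)).map (fun k : Nat => 0 + u * (k : Int)) := by
  rw [PySem.List.pyRange_of_pos _ _ hu]
  have hc : (if (0:Int) < u * ((m : Int) - 1) then ((u * ((m : Int) - 1) - 0 + u - 1) / u).toNat else 0) = m - 1 := by
    by_cases h : (0 : Int) < u * ((m : Int) - 1)
    · have hm : 2 ≤ (m : Int) := by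
        by_contra hc
        have : (m : Int) - 1 ≤ 0 := by omega
        nlinarith
      rw [if_pos h]
      have he : u * ((m : Int) - 1) - 0 + u - 1 = u * (m : Int) - 1 := by ring
      rw [he, ediv_mul_sub_one u (m : Int) hu]
      omega
    · rw [if_neg h]
      have : (m : Int) - 1 ≤ 0 := by
        by_contra hc
        exact h (by nlinarith)
      omega
  rw [hc]

theorem pyRange_B_of_pos (u : Int) (m : ℕ) (hu : 0 < u) :
    PySem.List.pyRange 0 ((m : Int) * u) u =
      (List.range m).map (fun k : Nat => 0 + u * (k : Int)) := by
  rw [PySem.List.pyRange_of_pos _ _ hu]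
  have hc : (if (0:Int) < (m : Int) * u then (((m : Int) * u - 0 + u - 1) / u).toNat else 0) = m := by
    by_cases h : (0 : Int) < (m : Int) * u
    · have hm : 1 ≤ (m : Int) := by
        by_contra hc
        have : (m : Int) = 0 := by omega
        rw [this] at h; simp at h
      rw [if_pos h]
      have he : (m : Int) * u - 0 + u - 1 = u * ((m : Int) + 1) - 1 := by ring
      rw [he, ediv_mul_sub_one u ((m : Int) + 1) hu]
      omega
    · rw [if_neg h]
      have : (m : Int) = 0 := by
        rcases Nat.eq_zero_or_pos m with h0 | h0
        · omega
        · exfalso; apply h; positivity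
      omega
  rw [hc]

-- both sides are trivially true for negative step (both ranges empty)
theorem pyRange_empty_of_neg (b u : Int) (hu : u < 0) (hb : 0 ≤ b) :
    PySem.List.pyRange 0 b u = [] := by
  rw [PySem.List.pyRange_of_neg _ _ hu, if_neg (by omega)]
  simp

theorem floordiv_nonpos_of_neg (a b : Int) (ha : 0 ≤ a) (hb : b < 0) :
    PySem.Int.floordiv a b ≤ 0 := by
  have h1 := PySem.Int.floordiv_mul_add_mod a b
  obtain ⟨h2, h3⟩ := PySem.Int.mod_neg_bounds a hb
  by_contra hc
  have h4 : PySem.Int.floordiv a b * b ≤ 1 * b :=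
    mul_le_mul_of_nonpos_right (by omega) (by omega)
  linarith

-- ===== VERDICT (by name: the statement is the Claim_ definition above) =====
-- zeta-reduced forms of the two ports (definitional)
theorem new_is_invalid_eq (id : String) (u : Int) :
    new_is_invalid id u =
      newIsInvalidLoopA id.toList u
        (PySem.List.pyRange 0 (u * (PySem.Int.floordiv (id.toList.length : Int) u - 1)) u) := rfl

theorem new_is_invalid_alt_eq (id : String) (u : Int) :
    new_is_invalid_alt id u =
      decide ((PySem.Set.ofList
        ((PySem.List.pyRange 0 ((PySem.Int.floordiv (id.toList.length : Int) u) * u) u).map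
          (fun i => PySem.List.slice id.toList (some i) (some (i + u))))).length ≤ 1) := rfl

-- ===== VERDICT (by name: the statement is the Claim_ definition above) =====
theorem new_is_invalid_spec : Claim_equal_new_is_invalid := by
  intro id u _ hpre
  unfold Spec_new_is_invalid
  rw [new_is_invalid_eq, new_is_invalid_alt_eq]
  set s := id.toList with hs
  set n := PySem.Int.floordiv (s.length : Int) u with hn
  rcases lt_trichotomy u 0 with hu | hu | hu
  · -- negative step: both ranges are empty, both results are true
    have hn0 : n ≤ 0 := floordiv_nonpos_of_neg _ _ (by positivity) hu
    have h1 : (0 : Int) ≤ u * (n - 1) := by nlinarith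
    have h2 : (0 : Int) ≤ n * u := by nlinarith
    rw [pyRange_empty_of_neg _ _ hu h1, pyRange_empty_of_neg _ _ hu h2]
    simp [newIsInvalidLoopA, PySem.Set.ofList]
  · exact absurd hu hpre
  · -- positive step
    obtain ⟨m, hm⟩ : ∃ m : ℕ, n = (m : Int) := by
      obtain ⟨v, hv⟩ : ∃ v : ℕ, u = (v : Int) := ⟨u.toNat, by omega⟩
      exact ⟨s.length / v, by rw [hn, hv, PySem.Int.floordiv_natCast]⟩
    rw [hm, pyRange_A_of_pos u m hu, pyRange_B_of_pos u m hu,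
        loopA_eq_all, ← PySem.List.dedup_eq_ofList]
    have hfuse : ((List.range m).map (fun k : ℕ => 0 + u * (k : Int))).map
        (fun i => PySem.List.slice s (some i) (some (i + u))) =
        (List.range m).map (fun k : ℕ =>
          PySem.List.slice s (some (u * (k : Int))) (some (u * (k : Int) + u))) := by
      rw [List.map_map]
      apply List.map_congr_left
      intro k _
      simp only [Function.comp_apply, zero_add]
    rw [hfuse]
    apply Bool.eq_iff_iff.mpr
    simp only [List.all_map, List.all_eq_true, List.mem_range,
               Function.comp_apply, decide_eq_true_eq, beq_iff_eq, zero_add]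
    rw [dedup_length_le_one_iff]
    constructor
    · intro h x hx y hy
      simp only [List.mem_map, List.mem_range] at hx hy
      obtain ⟨k, hk, rfl⟩ := hx
      obtain ⟨j, hj, rfl⟩ := hy
      have hstep : ∀ k : ℕ, k + 1 < m →
          (fun k : ℕ => PySem.List.slice s (some (u * (k : Int))) (some (u * (k : Int) + u))) k =
          (fun k : ℕ => PySem.List.slice s (some (u * (k : Int))) (some (u * (k : Int) + u))) (k + 1) := by
        intro k hk
        show PySem.List.slice s (some (u * (k : Int))) (some (u * (k : Int) + u)) =
             PySem.List.slice s (some (u * ((k + 1 : ℕ) : Int))) (some (u * ((k + 1 : ℕ) : Int) + u))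
        have e1 : u * ((k + 1 : ℕ) : Int) = u * (k : Int) + u := by push_cast; ring
        rw [e1]
        have e2 : u * (k : Int) + u + u = u * (k : Int) + 2 * u := by ring
        rw [e2]
        exact h k (by omega)
      have hall := (chain_iff_all_eq
        (fun k : ℕ => PySem.List.slice s (some (u * (k : Int))) (some (u * (k : Int) + u))) m).mp hstep
      have h1 := hall k hk
      have h2 := hall j hj
      simp only at h1 h2 ⊢
      rw [h1, h2]
    · intro h k hk
      have e1 : u * ((k + 1 : ℕ) : Int) = u * (k : Int) + u := by push_cast; ring
      have e2 : u * ((k + 1 : ℕ) : Int) + u = u * (k : Int) + 2 * u := by push_cast; ring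
      have hmem1 : PySem.List.slice s (some (u * (k : Int))) (some (u * (k : Int) + u)) ∈
          (List.range m).map (fun k : ℕ =>
            PySem.List.slice s (some (u * (k : Int))) (some (u * (k : Int) + u))) := by
        simp only [List.mem_map, List.mem_range]
        exact ⟨k, by omega, rfl⟩
      have hmem2 : PySem.List.slice s (some (u * ((k + 1 : ℕ) : Int)))
          (some (u * ((k + 1 : ℕ) : Int) + u)) ∈
          (List.range m).map (fun k : ℕ =>
            PySem.List.slice s (some (u * (k : Int))) (some (u * (k : Int) + u))) := by
        simp only [List.mem_map, List.mem_range]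
        exact ⟨k + 1, by omega, rfl⟩
      have := h _ hmem1 _ hmem2
      rw [e2, e1] at this
      exact this
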